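-- pv_equiv track=rewrite | github.com/AquaHorseM/JsonDataViewer | src/jsonviewer/ui/base.py | join_preview
-- ===== SOURCE A (Python) =====
-- from typing import Iterable
--
-- def join_preview(parts: Iterable[str], max_len: int) -> str:
--     """Join strings with spaces and truncate with ellipsis."""
--     out = ""
--     for p in parts:
--         if not p:
--             continue
--         if out:
--             cand = out + " " + p
--         else:
--             cand = p
--         if len(cand) > max_len:
--             return (cand[: max_len - 3] + "...") if max_len > 3 else cand[:max_len]
--         out = cand
--     return out
-- ===== SOURCE B (Python) =====
-- def join_preview(parts, max_len):
--     """Join strings with spaces and truncate with ellipsis."""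
--     joined = " ".join(p for p in parts if p)
--     if len(joined) <= max_len:
--         return joined
--     return (joined[: max_len - 3] + "...") if max_len > 3 else joined[:max_len]
-- ===== Notes on version B (the rewrite author's own statement) =====
-- stated objective: faster
-- what changed: B replaces A's incremental early-return loop (growing an accumulator by repeated string concatenation and length checks) with one str.join of the truthy parts plus a single closed-form truncation conditional, exploiting that each of A's candidates is a prefix of the full join; Pre_ excludes negative max_len, where Python's negative slicing makes both programs' truncations accidental artifacts.
-- outside the precondition, e.g. on join_preview(['ab', 'cd'], -1): A returns 'a', B returns 'ab c'
import Mathlib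
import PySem

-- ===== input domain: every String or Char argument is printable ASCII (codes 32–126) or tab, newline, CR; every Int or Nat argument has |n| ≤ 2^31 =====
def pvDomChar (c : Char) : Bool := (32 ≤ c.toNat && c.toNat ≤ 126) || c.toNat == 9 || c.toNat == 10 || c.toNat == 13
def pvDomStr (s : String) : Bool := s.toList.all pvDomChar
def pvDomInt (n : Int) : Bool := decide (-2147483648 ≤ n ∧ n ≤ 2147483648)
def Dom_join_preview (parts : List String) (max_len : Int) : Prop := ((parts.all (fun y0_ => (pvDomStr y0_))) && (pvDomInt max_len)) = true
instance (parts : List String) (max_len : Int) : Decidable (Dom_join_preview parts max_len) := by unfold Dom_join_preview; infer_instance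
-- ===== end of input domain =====

-- B replaces A's incremental early-return loop by one join of the truthy parts plus a single
-- closed-form truncation conditional (objective: faster — one linear join instead of repeated quadratic concatenation).

-- ===== PORT A =====
-- loop of A on the character-list side: `out` is the accumulator, early return on the first
-- candidate whose length exceeds max_len
def joinPreviewLoopA (max_len : Int) : List (List Char) → List Char → List Char
  | [], out => out
  | p :: rest, out =>
    if p = [] then joinPreviewLoopA max_len rest out          -- `if not p: continue`
    else
      let cand := if out ≠ [] then out ++ [' '] ++ p else p
      if (cand.length : Int) > max_len then
        (if max_len > 3 then PySem.List.slice cand none (some (max_len - 3)) ++ ['.', '.', '.']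
         else PySem.List.slice cand none (some max_len))
      else joinPreviewLoopA max_len rest cand

def join_preview (parts : List String) (max_len : Int) : String :=
  String.ofList (joinPreviewLoopA max_len (parts.map String.toList) [])

-- ===== PORT B =====
def join_preview_alt (parts : List String) (max_len : Int) : String :=
  let joined := PySem.Chars.join [' '] ((parts.filter (fun p => p ≠ "")).map String.toList)
  String.ofList (
    if (joined.length : Int) ≤ max_len then joined
    else if max_len > 3 then PySem.List.slice joined none (some (max_len - 3)) ++ ['.', '.', '.']
    else PySem.List.slice joined none (some max_len))

-- ===== PRECONDITION & SPEC =====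
-- Pre_ excludes negative max_len, on which A returns a value — a negative-slice prefix of only
-- the first nonempty part — that is an accident of Python's negative slicing plus A's early
-- return; B's value there (a negative-slice prefix of the whole join) is an equally accidental
-- artifact, and no caller would specify either corner behaviour.
def Pre_join_preview (parts : List String) (max_len : Int) : Prop := 0 ≤ max_len
instance (parts : List String) (max_len : Int) : Decidable (Pre_join_preview parts max_len) := by
  unfold Pre_join_preview; infer_instance
def pvWitness_join_preview : List String × Int := (["ab", "cd"], 4)
def Spec_join_preview (parts : List String) (max_len : Int) (out : String) : Prop :=
  out = join_preview_alt parts max_len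
instance (parts : List String) (max_len : Int) (out : String) : Decidable (Spec_join_preview parts max_len out) := by
  unfold Spec_join_preview; infer_instance

-- ===== CLAIM (what is proved, stated in full; the proofs are below) =====
def Claim_equal_join_preview : Prop := ∀ (parts : List String) (max_len : Int), Dom_join_preview parts max_len → Pre_join_preview parts max_len → Spec_join_preview parts max_len (join_preview parts max_len)

-- ===== LEMMAS AND PROOFS =====

-- B's truncation step, factored out for the proofs
def bTrunc (max_len : Int) (joined : List Char) : List Char :=
  if (joined.length : Int) ≤ max_len then joined
  else if max_len > 3 then PySem.List.slice joined none (some (max_len - 3)) ++ ['.', '.', '.']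
  else PySem.List.slice joined none (some max_len)

-- character lists of the filtered parts
def pvParts (parts : List String) : List (List Char) :=
  (parts.filter (fun p => p ≠ "")).map String.toList

lemma join_preview_alt_eq (parts : List String) (max_len : Int) :
    join_preview_alt parts max_len =
      String.ofList (bTrunc max_len (PySem.Chars.join [' '] (pvParts parts))) := by
  simp [join_preview_alt, bTrunc, pvParts]

-- skipping the empty parts = filtering them out up front
lemma loopA_filter (max_len : Int) (ps : List (List Char)) (out : List Char) :
    joinPreviewLoopA max_len ps out = joinPreviewLoopA max_len (ps.filter (fun p => p ≠ [])) out := by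
  induction ps generalizing out with
  | nil => rfl
  | cons p rest ih =>
    by_cases hp : p = []
    · subst hp; simp [joinPreviewLoopA, ih]
    · simp only [joinPreviewLoopA, List.filter_cons, hp]
      simp only [hp, decide_not, ite_not]
      simp [joinPreviewLoopA, hp, ih]

lemma join_empty : PySem.Chars.join [' '] ([] : List (List Char)) = [] := by
  simp [PySem.Chars.join, List.intercalate]

lemma join_nonempty_prefix (cand : List Char) (xs : List (List Char)) :
    ∃ t, PySem.Chars.join [' '] (cand :: xs) = cand ++ t := by
  cases xs with
  | nil => exact ⟨[], by rw [PySem.Chars.join_singleton]; simp⟩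
  | cons q rest =>
    exact ⟨[' '] ++ PySem.Chars.join [' '] (q :: rest), by rw [PySem.Chars.join_cons_cons]; simp⟩

-- the core invariant: with a fitting accumulator, A's loop computes B's truncation of the full join
lemma loopA_core (max_len : Int) (hm : 0 ≤ max_len) (xs : List (List Char))
    (hxs : ∀ p ∈ xs, p ≠ []) (out : List Char) (hout : (out.length : Int) ≤ max_len) :
    joinPreviewLoopA max_len xs out =
      bTrunc max_len (PySem.Chars.join [' '] (if out = [] then xs else out :: xs)) := by
  induction xs generalizing out with
  | nil =>
    by_cases h : out = []
    · subst h
      show ([] : List Char) = bTrunc max_len (PySem.Chars.join [' '] ([] : List (List Char)))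
      rw [join_empty, bTrunc, if_pos (by simp only [List.length_nil, Nat.cast_zero]; omega)]
    · rw [if_neg h, PySem.Chars.join_singleton]
      show out = bTrunc max_len out
      rw [bTrunc, if_pos hout]
  | cons p rest ih =>
    have hp : p ≠ [] := hxs p List.mem_cons_self
    have hrest : ∀ q ∈ rest, q ≠ [] := fun q hq => hxs q (List.mem_cons_of_mem _ hq)
    set cand := if out ≠ [] then out ++ [' '] ++ p else p with hcand
    have hcand_ne : cand ≠ [] := by
      rw [hcand]; by_cases h : out = [] <;> simp [h, hp]
    have hjoin : PySem.Chars.join [' '] (if out = [] then p :: rest else out :: p :: rest) =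
        PySem.Chars.join [' '] (cand :: rest) := by
      by_cases h : out = []
      · simp [h, hcand]
      · rw [if_neg h, hcand, if_pos h]
        cases rest with
        | nil => rw [PySem.Chars.join_cons_cons, PySem.Chars.join_singleton,
            PySem.Chars.join_singleton]
        | cons q rr => rw [PySem.Chars.join_cons_cons, PySem.Chars.join_cons_cons,
            PySem.Chars.join_cons_cons]; simp
    rw [hjoin]
    obtain ⟨t, ht⟩ := join_nonempty_prefix cand rest
    by_cases hlen : (cand.length : Int) > max_len
    · -- A truncates now; B truncates the full join at the same index, inside cand
      have hAl : joinPreviewLoopA max_len (p :: rest) out =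
          (if max_len > 3 then PySem.List.slice cand none (some (max_len - 3)) ++ ['.', '.', '.']
           else PySem.List.slice cand none (some max_len)) := by
        rw [joinPreviewLoopA]; rw [← hcand]; rw [if_neg (by simp [hp]), if_pos hlen]
      rw [hAl, bTrunc, ht]
      have hjl : ¬ (((cand ++ t).length : Int) ≤ max_len) := by
        simp only [List.length_append]; push_cast; omega
      rw [if_neg hjl]
      by_cases h3 : max_len > 3
      · rw [if_pos h3, if_pos h3,
          PySem.List.slice_to cand (by omega), PySem.List.slice_to (cand ++ t) (by omega),
          List.take_append_of_le_length (by omega : (max_len - 3).toNat ≤ cand.length)]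
      · rw [if_neg h3, if_neg h3,
          PySem.List.slice_to cand hm, PySem.List.slice_to (cand ++ t) hm,
          List.take_append_of_le_length (by omega : max_len.toNat ≤ cand.length)]
    · -- A keeps going with cand; apply the IH
      have hAl : joinPreviewLoopA max_len (p :: rest) out = joinPreviewLoopA max_len rest cand := by
        rw [joinPreviewLoopA]; rw [← hcand]; rw [if_neg (by simp [hp]), if_neg hlen]
      rw [hAl, ih hrest cand (by omega), if_neg hcand_ne]

lemma map_filter_parts (parts : List String) :
    (parts.map String.toList).filter (fun p => p ≠ []) = pvParts parts := by
  rw [pvParts, List.filter_map]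
  congr 1
  apply List.filter_congr
  intro s _
  simp [String.toList_eq_nil_iff]

lemma pvParts_ne (parts : List String) : ∀ p ∈ pvParts parts, p ≠ [] := by
  intro p hp
  obtain ⟨s, hs, rfl⟩ := List.mem_map.1 hp
  have := List.of_mem_filter hs
  simpa [String.toList_eq_nil_iff] using this

lemma join_preview_eq_loop (parts : List String) (max_len : Int) :
    join_preview parts max_len =
      String.ofList (joinPreviewLoopA max_len (pvParts parts) []) := by
  rw [join_preview, loopA_filter, map_filter_parts]

-- ===== VERDICT (by name: the statement is the Claim_ definition above) =====
theorem join_preview_spec : Claim_equal_join_preview := by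
  intro parts max_len _ hm
  show join_preview parts max_len = join_preview_alt parts max_len
  rw [join_preview_eq_loop, join_preview_alt_eq,
    loopA_core max_len hm (pvParts parts) (pvParts_ne parts) [] (by simpa using hm)]
  rfl
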